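-- pv_equiv track=rewrite | github.com/kcharymyrat/string_censoring | brute_force.py | brute_force_algo_no_log
-- ===== SOURCE A (Python) =====
-- def brute_force_algo_no_log(text, word):
--     text_len = len(text)
--     word_len = len(word)
--
--     text_lst = list(text)
--     match = False
--
--     for i in range(text_len - word_len + 1):
--         match = True
--         for j in range(0, word_len):
--             if word[j] != text[i + j]:
--                 match = False
--                 break
--
--         if match:
--             for k in range(word_len):
--                 text_lst[i + k] = "*"
--
--     return "".join(text_lst)
-- ===== SOURCE B (Python) =====
-- def brute_force_algo_no_log(text, word):
--     n, m = len(text), len(word)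
--     occ = [i for i in range(n - m + 1) if text[i:i+m] == word]
--     return "".join(
--         '*' if any(i <= p < i + m for i in occ) else c
--         for p, c in enumerate(text)
--     )
-- ===== Notes on version B (the rewrite author's own statement) =====
-- stated objective: idiomatic
-- what changed: Replaces the char-by-char inner matching loop and in-place list mutation by slice-comparison to collect occurrence positions, then builds the output functionally, starring each position covered by some occurrence.
import Mathlib
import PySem

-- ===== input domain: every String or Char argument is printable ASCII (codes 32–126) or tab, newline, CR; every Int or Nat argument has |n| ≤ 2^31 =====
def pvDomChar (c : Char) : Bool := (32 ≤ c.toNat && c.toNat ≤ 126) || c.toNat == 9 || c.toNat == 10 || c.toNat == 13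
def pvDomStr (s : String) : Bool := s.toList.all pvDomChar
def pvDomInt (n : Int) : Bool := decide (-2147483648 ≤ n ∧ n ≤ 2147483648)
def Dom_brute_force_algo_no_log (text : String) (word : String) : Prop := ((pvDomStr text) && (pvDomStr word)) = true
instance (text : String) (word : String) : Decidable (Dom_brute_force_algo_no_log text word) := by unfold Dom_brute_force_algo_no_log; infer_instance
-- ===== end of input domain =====

-- B replaces A's char-by-char inner matching loop and in-place starring by slice-comparison
-- occurrence collection plus a functional rebuild (objective: idiomatic; same asymptotic cost).

-- ===== PORT A =====
-- Literal port of A. Python str indexing word[j] / text[i+j] is always in range here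
-- (0 ≤ j < len(word), 0 ≤ i ≤ len(text)-len(word)), so it is ported with pyGetD (exact in range);
-- the in-place list assignment text_lst[i+k] = "*" is pySetD (index always in range);
-- the inner loop's `break` is modelled by the carried Bool: once the flag is false the
-- remaining iterations leave it false, exactly as skipping them would.
-- text_lst is a list of one-character strings, modelled as List Char; "".join(text_lst) is String.ofList.
def brute_force_algo_no_log (text : String) (word : String) : String :=
  let text_len : Int := PySem.Str.len text
  let word_len : Int := PySem.Str.len word
  let tl : List Char := text.toList
  let wl : List Char := word.toList
  let text_lst : List Char :=
    (PySem.List.pyRange 0 (text_len - word_len + 1) 1).foldl (fun lst i =>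
      let m : Bool :=
        (PySem.List.pyRange 0 word_len 1).foldl (fun m j =>
          if m then
            (if PySem.List.pyGetD wl j ' ' ≠ PySem.List.pyGetD tl (i + j) ' ' then false else m)
          else m) true
      if m then
        (PySem.List.pyRange 0 word_len 1).foldl (fun lst k =>
          PySem.List.pySetD lst (i + k) '*') lst
      else lst) tl
  String.ofList text_lst

-- ===== PORT B =====
-- Literal port of B: occurrence starts by slice comparison, then a functional join over enumerate.
def brute_force_algo_no_log_alt (text : String) (word : String) : String :=
  let tl : List Char := text.toList
  let wl : List Char := word.toList
  let n : Int := PySem.Str.len text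
  let m : Int := PySem.Str.len word
  let occ : List Int :=
    (PySem.List.pyRange 0 (n - m + 1) 1).filter
      (fun i => PySem.List.slice tl (some i) (some (i + m)) == wl)
  String.ofList ((PySem.List.enumerate tl 0).map
    (fun pc => if occ.any (fun i => decide (i ≤ pc.1 ∧ pc.1 < i + m)) then '*' else pc.2))

-- ===== PRECONDITION & SPEC =====
def Spec_brute_force_algo_no_log (text : String) (word : String) (out : String) : Prop := out = brute_force_algo_no_log_alt text word
instance (text : String) (word : String) (out : String) : Decidable (Spec_brute_force_algo_no_log text word out) := by unfold Spec_brute_force_algo_no_log; infer_instance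

-- ===== CLAIM (what is proved, stated in full; the proofs are below) =====
def Claim_equal_brute_force_algo_no_log : Prop := ∀ (text : String) (word : String), Dom_brute_force_algo_no_log text word → Spec_brute_force_algo_no_log text word (brute_force_algo_no_log text word)

-- ===== LEMMAS AND PROOFS =====

-- the match test shared by both characterisations
def pvM (tl wl : List Char) (i : Nat) : Bool :=
  PySem.List.slice tl (some (i : Int)) (some ((i : Int) + (wl.length : Int))) == wl

-- The starring inner loop preserves length.
theorem pv_stamp_len (c : Nat) (lst : List Char) (i : Nat) :
    ((List.range c).foldl (fun l k => l.set (i + k) '*') lst).length = lst.length := by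
  induction c with
  | zero => simp
  | succ c ih => simp [List.range_succ, List.foldl_append, ih]

-- Element-wise description of the starring loop.
theorem pv_stamp_get (c : Nat) (lst : List Char) (i p : Nat) :
    ((List.range c).foldl (fun l k => l.set (i + k) '*') lst)[p]? =
      if i ≤ p ∧ p < i + c ∧ p < lst.length then some '*' else lst[p]? := by
  induction c with
  | zero => rw [if_neg (by omega)]; simp
  | succ c ih =>
    simp only [List.range_succ, List.foldl_append, List.foldl_cons, List.foldl_nil]
    rw [List.getElem?_set, pv_stamp_len, ih]
    split_ifs <;> first
      | rfl
      | omega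
      | (rw [List.getElem?_eq_none (by omega)])

-- A's inner matching loop computes exactly B's slice comparison.
theorem pv_match_eq (tl wl : List Char) (i : Nat) (h : i + wl.length ≤ tl.length) :
    ((PySem.List.pyRange 0 (wl.length : Int) 1).foldl (fun m j =>
        if m then
          (if PySem.List.pyGetD wl j ' ' ≠ PySem.List.pyGetD tl ((i : Nat) + j) ' ' then false else m)
        else m) true)
      = (PySem.List.slice tl (some (i : Int)) (some ((i : Int) + (wl.length : Int))) == wl) := by
  have hfun : (fun (m : Bool) (j : Int) =>
      if m then
        (if PySem.List.pyGetD wl j ' ' ≠ PySem.List.pyGetD tl ((i : Nat) + j) ' ' then false else m)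
      else m)
    = (fun (m : Bool) (j : Int) =>
      if (PySem.List.pyGetD wl j ' ' != PySem.List.pyGetD tl ((i : Nat) + j) ' ') then false else m) := by
    funext m j
    cases m <;> simp [bne_iff_ne]
  rw [hfun, PySem.List.foldl_if_false_eq, Bool.true_and]
  rw [PySem.List.slice_natCast_add]
  rw [Bool.eq_iff_iff]
  simp only [Bool.not_eq_eq_eq_not, Bool.not_true, List.any_eq_false, bne_iff_ne, ne_eq,
    Decidable.not_not, beq_iff_eq]
  constructor
  · intro hall
    apply List.ext_getElem?
    intro j
    by_cases hj : j < wl.length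
    · have := hall ((j : Int)) (by rw [PySem.List.mem_pyRange_one]; omega)
      rw [show ((i:Int) + (j:Int)) = ((i + j : Nat) : Int) by push_cast; ring] at this
      rw [PySem.List.pyGetD_eq_getElem wl ' ' (by omega) (by omega)] at this
      rw [PySem.List.pyGetD_eq_getElem tl ' ' (by omega) (by omega)] at this
      simp only [Int.toNat_natCast] at this
      rw [List.getElem?_take, List.getElem?_drop, if_pos hj]
      rw [List.getElem?_eq_getElem (by omega), List.getElem?_eq_getElem (by omega)]
      rw [this]
    · rw [List.getElem?_eq_none (by simp; omega), List.getElem?_eq_none (by omega)]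
  · intro heq j hj
    rw [PySem.List.mem_pyRange_one] at hj
    have hjlt : j.toNat < wl.length := by omega
    rw [show ((i:Int) + j) = ((i + j.toNat : Nat) : Int) by omega]
    rw [PySem.List.pyGetD_eq_getElem wl ' ' (by omega) (by omega)]
    rw [PySem.List.pyGetD_eq_getElem tl ' ' (by omega) (by push_cast; omega)]
    simp only [Int.toNat_natCast]
    have h2 := congrArg (fun l => l[j.toNat]?) heq
    simp only [List.getElem?_take, List.getElem?_drop, if_pos hjlt] at h2
    rw [List.getElem?_eq_getElem (by omega), List.getElem?_eq_getElem (by omega)] at h2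
    exact (Option.some.inj h2).symm

-- A's outer loop (in Nat form) preserves length.
theorem pv_outer_len (tl wl : List Char) (c : Nat) :
    ((List.range c).foldl (fun lst i =>
        if pvM tl wl i then (List.range wl.length).foldl (fun l k => l.set (i + k) '*') lst
        else lst) tl).length = tl.length := by
  induction c with
  | zero => simp
  | succ c ih =>
    simp only [List.range_succ, List.foldl_append, List.foldl_cons, List.foldl_nil]
    split
    · rw [pv_stamp_len]; exact ih
    · exact ih

-- Element-wise description of A's outer loop.
theorem pv_outer_get (tl wl : List Char) (c : Nat)
    (hc : ∀ i, i < c → i + wl.length ≤ tl.length) (p : Nat) :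
    ((List.range c).foldl (fun lst i =>
        if pvM tl wl i then (List.range wl.length).foldl (fun l k => l.set (i + k) '*') lst
        else lst) tl)[p]? =
      if (List.range c).any (fun i => pvM tl wl i && (decide (i ≤ p) && decide (p < i + wl.length)))
      then some '*' else tl[p]? := by
  induction c with
  | zero => simp
  | succ c ih =>
    have hc' : ∀ i, i < c → i + wl.length ≤ tl.length := fun i hi => hc i (by omega)
    simp only [List.range_succ, List.foldl_append, List.foldl_cons, List.foldl_nil,
      List.any_append, List.any_cons, List.any_nil, Bool.or_false]
    by_cases hm : pvM tl wl c
    · rw [if_pos hm, pv_stamp_get, pv_outer_len, ih hc', hm, Bool.true_and]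
      by_cases hcov : c ≤ p ∧ p < c + wl.length
      · rw [if_pos ⟨hcov.1, hcov.2, by have := hc c (by omega); omega⟩]
        rw [show (decide (c ≤ p) && decide (p < c + wl.length)) = true by simp [hcov.1, hcov.2]]
        rw [Bool.or_true, if_pos rfl]
      · rw [if_neg (by omega)]
        rw [show (decide (c ≤ p) && decide (p < c + wl.length)) = false by
          rcases Decidable.not_and_iff_or_not.mp hcov with h | h <;> simp [h]]
        rw [Bool.or_false]
    · rw [if_neg hm, ih hc']
      rw [Bool.not_eq_true] at hm
      rw [hm, Bool.false_and, Bool.or_false]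

-- The list-level equivalence of the two ports.
theorem pv_list (tl wl : List Char) :
    (PySem.List.pyRange 0 ((tl.length : Int) - (wl.length : Int) + 1) 1).foldl (fun lst i =>
      let m : Bool :=
        (PySem.List.pyRange 0 (wl.length : Int) 1).foldl (fun m j =>
          if m then
            (if PySem.List.pyGetD wl j ' ' ≠ PySem.List.pyGetD tl (i + j) ' ' then false else m)
          else m) true
      if m then
        (PySem.List.pyRange 0 (wl.length : Int) 1).foldl (fun lst k =>
          PySem.List.pySetD lst (i + k) '*') lst
      else lst) tl
    = (PySem.List.enumerate tl 0).map
        (fun pc => if ((PySem.List.pyRange 0 ((tl.length : Int) - (wl.length : Int) + 1) 1).filter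
            (fun i => PySem.List.slice tl (some i) (some (i + (wl.length : Int))) == wl)).any
            (fun i => decide (i ≤ pc.1 ∧ pc.1 < i + (wl.length : Int))) then '*' else pc.2) := by
  have hbound : ∀ i : Nat, i < tl.length + 1 - wl.length → i + wl.length ≤ tl.length := by
    intro i hi; omega
  -- A's outer loop in Nat form
  have hA : (PySem.List.pyRange 0 ((tl.length : Int) - (wl.length : Int) + 1) 1).foldl (fun lst i =>
      let m : Bool :=
        (PySem.List.pyRange 0 (wl.length : Int) 1).foldl (fun m j =>
          if m then
            (if PySem.List.pyGetD wl j ' ' ≠ PySem.List.pyGetD tl (i + j) ' ' then false else m)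
          else m) true
      if m then
        (PySem.List.pyRange 0 (wl.length : Int) 1).foldl (fun lst k =>
          PySem.List.pySetD lst (i + k) '*') lst
      else lst) tl
    = (List.range (tl.length + 1 - wl.length)).foldl (fun lst i =>
        if pvM tl wl i then (List.range wl.length).foldl (fun l k => l.set (i + k) '*') lst
        else lst) tl := by
    rw [PySem.List.pyRange_one 0 ((tl.length : Int) - (wl.length : Int) + 1), List.foldl_map]
    rw [show ((tl.length : Int) - (wl.length : Int) + 1 - 0).toNat = tl.length + 1 - wl.length by omega]
    apply PySem.List.foldl_congr_mem
    intro lst i hi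
    rw [List.mem_range] at hi
    simp only [zero_add]
    rw [pv_match_eq tl wl i (hbound i hi)]
    show (if pvM tl wl i then _ else lst) = _
    by_cases hm : pvM tl wl i
    · rw [if_pos hm, if_pos hm]
      rw [PySem.List.pyRange_one 0 ((wl.length : Int)), List.foldl_map]
      rw [show ((wl.length : Int) - 0).toNat = wl.length by omega]
      apply PySem.List.foldl_congr_mem
      intro l k hk
      rw [show ((i : Int) + (0 + (k : Int))) = ((i + k : Nat) : Int) by push_cast; ring]
      rw [PySem.List.pySetD_natCast]
    · rw [if_neg hm, if_neg hm]
  rw [hA]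
  -- B side, elementwise
  have hBlen : ((PySem.List.enumerate tl 0).map
      (fun pc => if ((PySem.List.pyRange 0 ((tl.length : Int) - (wl.length : Int) + 1) 1).filter
          (fun i => PySem.List.slice tl (some i) (some (i + (wl.length : Int))) == wl)).any
          (fun i => decide (i ≤ pc.1 ∧ pc.1 < i + (wl.length : Int))) then '*' else pc.2)).length
      = tl.length := by
    rw [List.length_map, PySem.List.length_enumerate]
  apply List.ext_getElem?
  intro p
  rw [pv_outer_get tl wl _ hbound p]
  by_cases hp : p < tl.length
  · rw [List.getElem?_map, PySem.List.getElem?_enumerate, Option.map_map]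
    rw [List.getElem?_eq_getElem hp]
    simp only [Option.map_some, Function.comp_apply]
    have hany : ((PySem.List.pyRange 0 ((tl.length : Int) - (wl.length : Int) + 1) 1).filter
        (fun i => PySem.List.slice tl (some i) (some (i + (wl.length : Int))) == wl)).any
        (fun i => decide (i ≤ ((0 : Int) + (p : Nat)) ∧ ((0 : Int) + (p : Nat)) < i + (wl.length : Int)))
        = (List.range (tl.length + 1 - wl.length)).any
            (fun i => pvM tl wl i && (decide (i ≤ p) && decide (p < i + wl.length))) := by
      rw [List.any_filter, PySem.List.pyRange_one 0 ((tl.length : Int) - (wl.length : Int) + 1),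
        List.any_map,
        show ((tl.length : Int) - (wl.length : Int) + 1 - 0).toNat = tl.length + 1 - wl.length by omega]
      apply PySem.List.any_congr_mem
      intro i hi
      simp only [Function.comp_apply, zero_add]
      show (pvM tl wl i && _) = _
      congr 1
      rw [Bool.decide_and]
      congr 1
      · rw [decide_eq_decide]; omega
      · rw [decide_eq_decide]; omega
    rw [hany]
    cases ((List.range (tl.length + 1 - wl.length)).any
        (fun i => pvM tl wl i && (decide (i ≤ p) && decide (p < i + wl.length)))) <;> simp
  · rw [List.getElem?_eq_none (by omega), List.getElem?_eq_none (by rw [hBlen]; omega)]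
    rw [if_neg]
    simp only [List.any_eq_true, not_exists, List.mem_range, not_and]
    intro i hi hcontra
    have := hbound i hi
    simp only [Bool.and_eq_true, decide_eq_true_eq] at hcontra
    omega

theorem pv_main (text word : String) :
    brute_force_algo_no_log text word = brute_force_algo_no_log_alt text word := by
  unfold brute_force_algo_no_log brute_force_algo_no_log_alt
  simp only [PySem.Str.len_eq]
  exact congrArg String.ofList (pv_list text.toList word.toList)


-- ===== VERDICT (by name: the statement is the Claim_ definition above) =====
theorem brute_force_algo_no_log_spec : Claim_equal_brute_force_algo_no_log := by
  intro text word _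
  unfold Spec_brute_force_algo_no_log
  exact pv_main text word
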